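-- pv_equiv track=rewrite | github.com/DzianaMik/Lessons-Python | lesson8/homework/6.py | yes_or_n
-- ===== SOURCE A (Python) =====
-- def yes_or_n(full_number):
--      if not all(isinstance(x, int) for x in full_number):
--         return False
--      seen = set()
--      result = []
--      for num in full_number:
--         if num in seen:
--             result.append("Yes")
--         else:
--             result.append("No")
--             seen.add(num)
--      return result
-- ===== SOURCE B (Python) =====
-- def yes_or_n(full_number):
--     if not all(isinstance(x, int) for x in full_number):
--         return False
--     first = {}
--     for i, num in enumerate(full_number):
--         if num not in first:
--             first[num] = i
--     return ["No" if first[num] == i else "Yes" for i, num in enumerate(full_number)]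
-- ===== Notes on version B (the rewrite author's own statement) =====
-- stated objective: alternative
-- what changed: Replaces the single-pass running seen-set with a two-pass decomposition: first build a dict of each value's first-occurrence index, then map over enumerate emitting 'No' exactly at the first occurrence.
import Mathlib
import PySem

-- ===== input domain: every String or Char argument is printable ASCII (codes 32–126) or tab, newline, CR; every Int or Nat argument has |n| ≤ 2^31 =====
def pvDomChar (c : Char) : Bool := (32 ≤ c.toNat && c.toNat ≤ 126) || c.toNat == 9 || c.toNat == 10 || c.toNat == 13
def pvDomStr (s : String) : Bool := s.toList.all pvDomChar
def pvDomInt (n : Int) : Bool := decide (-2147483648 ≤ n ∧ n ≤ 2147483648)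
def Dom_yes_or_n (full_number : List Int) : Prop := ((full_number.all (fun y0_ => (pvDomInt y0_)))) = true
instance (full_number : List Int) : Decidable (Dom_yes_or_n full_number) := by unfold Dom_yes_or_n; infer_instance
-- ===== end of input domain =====

-- B changes the decomposition (first-occurrence-index table, then a rescan) instead of A's running seen-set; same cost.
-- A's all-int guard is vacuous on List Int, so it is not ported.

-- ===== PORT A =====
-- the 'for num in full_number' loop of A, carrying the seen set and emitting the result in order
def yesLoopA (xs : List Int) (seen : PySem.Set Int) : List String :=
  match xs with
  | [] => []
  | num :: rest =>
      if PySem.Set.contains seen num then "Yes" :: yesLoopA rest seen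
      else "No" :: yesLoopA rest (PySem.Set.add seen num)

def yes_or_n (full_number : List Int) : List String :=
  yesLoopA full_number PySem.Set.empty

-- ===== PORT B =====
-- first pass of B: dict value ↦ index of first occurrence (set only when absent)
def firstIdxFold (l : List (Int × Int)) (d : PySem.Dict Int Int) : PySem.Dict Int Int :=
  l.foldl (fun d p => if d.contains p.2 then d else d.insert p.2 p.1) d

def yes_or_n_alt (full_number : List Int) : List String :=
  let first := firstIdxFold (PySem.List.enumerate full_number) PySem.Dict.empty
  (PySem.List.enumerate full_number).map
    (fun p => if first.getD p.2 0 = p.1 then "No" else "Yes")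

-- ===== PRECONDITION & SPEC =====
def Spec_yes_or_n (full_number : List Int) (out : List String) : Prop := out = yes_or_n_alt full_number
instance (full_number : List Int) (out : List String) : Decidable (Spec_yes_or_n full_number out) := by unfold Spec_yes_or_n; infer_instance

-- ===== CLAIM (what is proved, stated in full; the proofs are below) =====
def Claim_equal_yes_or_n : Prop := ∀ (full_number : List Int), Dom_yes_or_n full_number → Spec_yes_or_n full_number (yes_or_n full_number)

-- ===== LEMMAS AND PROOFS =====

theorem firstIdxFold_cons (p : Int × Int) (t : List (Int × Int)) (d : PySem.Dict Int Int) :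
    firstIdxFold (p :: t) d = firstIdxFold t (if d.contains p.2 then d else d.insert p.2 p.1) := rfl

-- the fold only inserts absent keys, so present keys keep their value
theorem firstIdxFold_get?_of_contains (l : List (Int × Int)) (d : PySem.Dict Int Int)
    (v : Int) (h : d.contains v = true) :
    (firstIdxFold l d).get? v = d.get? v := by
  induction l generalizing d with
  | nil => rfl
  | cons p t ih =>
      rw [firstIdxFold_cons]
      by_cases hc : d.contains p.2 = true
      · rw [if_pos hc]; exact ih d h
      · rw [if_neg hc]
        have hne : p.2 ≠ v := fun e => hc (e ▸ h)
        rw [ih (d.insert p.2 p.1) (by rw [PySem.Dict.contains_insert]; simp [h])]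
        exact PySem.Dict.get?_insert_of_ne _ _ (fun e => hne e.symm)

-- main invariant: with seen ↔ the dict's keys and every stored index < s,
-- B's rescan over enumerate xs s equals A's loop
theorem loop_eq (xs : List Int) (s : Int) (d : PySem.Dict Int Int) (seen : PySem.Set Int)
    (hmem : ∀ v, PySem.Set.contains seen v = d.contains v)
    (hlt : ∀ v i, d.get? v = some i → i < s) :
    (PySem.List.enumerate xs s).map
      (fun p => if (firstIdxFold (PySem.List.enumerate xs s) d).getD p.2 0 = p.1 then "No" else "Yes")
      = yesLoopA xs seen := by
  induction xs generalizing s d seen with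
  | nil => simp [PySem.List.enumerate_nil, yesLoopA]
  | cons num rest ih =>
      rw [PySem.List.enumerate_cons, firstIdxFold_cons]
      simp only [List.map_cons, yesLoopA]
      rw [hmem num]
      by_cases hc : d.contains num = true
      · -- already seen: head is "Yes"
        rw [if_pos hc, if_pos hc]
        obtain ⟨i, hi⟩ : ∃ i, d.get? num = some i := by
          have := PySem.Dict.contains_eq_isSome_get? (d := d) (k := num)
          rw [hc] at this
          cases h : d.get? num with
          | none => rw [h] at this; simp at this
          | some i => exact ⟨i, rfl⟩
        have hfin : (firstIdxFold (PySem.List.enumerate rest (s + 1)) d).getD num 0 = i := by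
          rw [PySem.Dict.getD_eq_get?_getD, firstIdxFold_get?_of_contains _ _ _ hc, hi]; rfl
        have hlt' : i < s := hlt num i hi
        rw [hfin, if_neg (by omega : ¬ i = s)]
        refine congrArg _ (ih (s + 1) d seen hmem ?_)
        intro v j hj; have := hlt v j hj; omega
      · -- fresh: head is "No", dict gains num ↦ s
        rw [if_neg hc, if_neg hc]
        have hfin : (firstIdxFold (PySem.List.enumerate rest (s + 1)) (d.insert num s)).getD num 0 = s := by
          rw [PySem.Dict.getD_eq_get?_getD,
            firstIdxFold_get?_of_contains _ _ _ (by rw [PySem.Dict.contains_insert]; simp),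
            PySem.Dict.get?_insert_self]; rfl
        rw [hfin, if_pos rfl]
        refine congrArg _ (ih (s + 1) (d.insert num s) (PySem.Set.add seen num) ?_ ?_)
        · intro v
          rw [PySem.Dict.contains_insert]
          by_cases hv : v = num
          · subst hv
            rw [(PySem.Set.contains_iff _ _).mpr ((PySem.Set.mem_add _ _ _).mpr (Or.inr rfl))]
            simp
          · have hadd : PySem.Set.contains (PySem.Set.add seen num) v = PySem.Set.contains seen v := by
              by_cases hs : v ∈ seen
              · rw [(PySem.Set.contains_iff _ _).mpr ((PySem.Set.mem_add _ _ _).mpr (Or.inl hs)),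
                  (PySem.Set.contains_iff _ _).mpr hs]
              · have hna : v ∉ PySem.Set.add seen num :=
                  fun h => ((PySem.Set.mem_add _ _ _).mp h).elim hs hv
                rw [Bool.eq_false_iff.mpr (fun h => hna ((PySem.Set.contains_iff _ _).mp h)),
                  Bool.eq_false_iff.mpr (fun h => hs ((PySem.Set.contains_iff _ _).mp h))]
            rw [hadd, hmem v]
            simp [beq_iff_eq, hv]
        · intro v j hj
          by_cases hv : v = num
          · subst hv; rw [PySem.Dict.get?_insert_self] at hj
            cases hj; omega
          · rw [PySem.Dict.get?_insert_of_ne _ _ hv] at hj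
            have := hlt v j hj; omega

-- ===== VERDICT (by name: the statement is the Claim_ definition above) =====
theorem yes_or_n_spec : Claim_equal_yes_or_n := by
  intro xs _
  unfold Spec_yes_or_n yes_or_n yes_or_n_alt
  exact (loop_eq xs 0 PySem.Dict.empty PySem.Set.empty
    (fun v => by simp [PySem.Set.empty, PySem.Set.contains, PySem.Dict.contains_empty])
    (fun v i h => by simp [PySem.Dict.get?_empty] at h)).symm
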